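-- pv_equiv track=rewrite | github.com/Magic07/online-judge-solutions | leetcode/1548-check-if-all-1s-are-at-least-length-k-places-away.py | kLengthApart
-- ===== SOURCE A (Python) =====
-- from typing import List
--
-- def kLengthApart(nums: List[int], k: int) -> bool:
--     lastOne=-1
--     for i in range(len(nums)):
--         if nums[i]==1:
--             if lastOne>=0 and i-lastOne-1<k:
--                 return False
--             else:
--                 lastOne=i
--     return True
-- ===== SOURCE B (Python) =====
-- from typing import List
--
-- def kLengthApart(nums: List[int], k: int) -> bool:
--     ones = [i for i, x in enumerate(nums) if x == 1]
--     return all(b - a - 1 >= k for a, b in zip(ones, ones[1:]))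
-- ===== Notes on version B (the rewrite author's own statement) =====
-- stated objective: simpler
-- what changed: B first collects the indices of all 1s and then checks every consecutive gap with zip/all, instead of A's single tracking scan with lastOne state and an early return.
import Mathlib
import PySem

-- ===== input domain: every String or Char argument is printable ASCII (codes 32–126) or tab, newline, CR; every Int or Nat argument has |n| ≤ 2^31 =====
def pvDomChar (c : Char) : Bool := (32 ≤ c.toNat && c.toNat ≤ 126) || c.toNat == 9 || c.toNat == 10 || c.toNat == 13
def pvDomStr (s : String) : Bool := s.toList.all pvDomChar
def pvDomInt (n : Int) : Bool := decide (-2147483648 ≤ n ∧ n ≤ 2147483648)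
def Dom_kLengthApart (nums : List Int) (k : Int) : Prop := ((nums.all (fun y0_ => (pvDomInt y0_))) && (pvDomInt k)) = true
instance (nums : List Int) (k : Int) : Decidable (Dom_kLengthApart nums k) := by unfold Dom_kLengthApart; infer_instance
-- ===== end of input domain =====

-- ===== PORT A =====
-- header: B separates the scan into collect-indices-of-1s then check consecutive gaps (objective: simpler); return values only, no mutation.

-- loop body of A: walk the enumerated list carrying lastOne, early-return False on a close pair
def kLengthApartLoop (k : Int) : List (Int × Int) → Int → Bool
  | [], _ => true
  | (i, x) :: rest, lastOne =>
    if x == 1 then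
      if decide (lastOne ≥ 0) && decide (i - lastOne - 1 < k) then false
      else kLengthApartLoop k rest i
    else kLengthApartLoop k rest lastOne

def kLengthApart (nums : List Int) (k : Int) : Bool :=
  kLengthApartLoop k (PySem.List.enumerate nums 0) (-1)

-- ===== PORT B =====
def kLengthApart_alt (nums : List Int) (k : Int) : Bool :=
  let ones : List Int :=
    (PySem.List.enumerate nums 0).filterMap (fun p => if p.2 == 1 then some p.1 else none)
  (ones.zip (ones.drop 1)).all (fun p => decide (p.2 - p.1 - 1 ≥ k))

-- ===== PRECONDITION & SPEC =====
def Spec_kLengthApart (nums : List Int) (k : Int) (out : Bool) : Prop := out = kLengthApart_alt nums k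
instance (nums : List Int) (k : Int) (out : Bool) : Decidable (Spec_kLengthApart nums k out) := by unfold Spec_kLengthApart; infer_instance

-- ===== CLAIM (what is proved, stated in full; the proofs are below) =====
def Claim_equal_kLengthApart : Prop := ∀ (nums : List Int) (k : Int), Dom_kLengthApart nums k → Spec_kLengthApart nums k (kLengthApart nums k)

-- ===== LEMMAS AND PROOFS =====

-- the index chain A effectively walks: positions of 1s, compared pairwise
def pvChain (k : Int) : Int → List Int → Bool
  | _, [] => true
  | lastOne, i :: rest =>
    if decide (lastOne ≥ 0) && decide (i - lastOne - 1 < k) then false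
    else pvChain k i rest

def pvOnes (L : List (Int × Int)) : List Int :=
  L.filterMap (fun p => if p.2 == 1 then some p.1 else none)

theorem pvLoop_eq_chain (k : Int) (L : List (Int × Int)) :
    ∀ lastOne, kLengthApartLoop k L lastOne = pvChain k lastOne (pvOnes L) := by
  induction L with
  | nil => intro lastOne; simp [kLengthApartLoop, pvOnes, pvChain]
  | cons p rest ih =>
    intro lastOne
    obtain ⟨i, x⟩ := p
    by_cases hx : x = 1
    · simp [kLengthApartLoop, pvOnes, hx, pvChain, ih]
    · simp [kLengthApartLoop, pvOnes, hx, ih]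

theorem pvChain_eq_zip (k : Int) :
    ∀ (os : List Int) (i0 : Int), 0 ≤ i0 → (∀ j ∈ os, 0 ≤ j) →
      pvChain k i0 os =
        ((i0 :: os).zip os).all (fun p => decide (p.2 - p.1 - 1 ≥ k)) := by
  intro os
  induction os with
  | nil => intro i0 _ _; simp [pvChain]
  | cons j rest ih =>
    intro i0 h0 hmem
    have hj : 0 ≤ j := hmem j (by simp)
    simp only [pvChain, List.zip_cons_cons, List.all_cons]
    split_ifs with h
    · simp only [Bool.and_eq_true, decide_eq_true_eq] at h
      have hd : (decide (j - i0 - 1 ≥ k)) = false := by simp; omega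
      rw [hd, Bool.false_and]
    · have hlt : ¬ (j - i0 - 1 < k) := by
        simp only [Bool.and_eq_true, decide_eq_true_eq] at h
        intro hc; exact h ⟨h0, hc⟩
      have hd : (decide (j - i0 - 1 ≥ k)) = true := by simp; omega
      rw [hd, Bool.true_and]
      exact ih j hj (fun x hx => hmem x (by simp [hx]))

theorem pvChain_neg (k : Int) (os : List Int) (h : ∀ j ∈ os, 0 ≤ j) :
    pvChain k (-1) os = (os.zip (os.drop 1)).all (fun p => decide (p.2 - p.1 - 1 ≥ k)) := by
  cases os with
  | nil => simp [pvChain]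
  | cons i0 rest =>
    have h0 : (0:Int) ≤ i0 := h i0 (by simp)
    have hstep : pvChain k (-1) (i0 :: rest) = pvChain k i0 rest := by
      simp [pvChain]
    rw [hstep, List.drop_succ_cons, List.drop_zero]
    exact pvChain_eq_zip k rest i0 h0 (fun x hx => h x (by simp [hx]))

theorem pvOnes_nonneg (nums : List Int) :
    ∀ j ∈ pvOnes (PySem.List.enumerate nums 0), 0 ≤ j := by
  intro j hj
  simp only [pvOnes, List.mem_filterMap] at hj
  obtain ⟨p, hp, hpj⟩ := hj
  rw [PySem.List.mem_enumerate_iff] at hp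
  obtain ⟨m, hm, rfl⟩ := hp
  split_ifs at hpj with h
  simp at hpj
  omega

-- ===== VERDICT (by name: the statement is the Claim_ definition above) =====
theorem kLengthApart_spec : Claim_equal_kLengthApart := by
  intro nums k _
  unfold Spec_kLengthApart kLengthApart kLengthApart_alt
  rw [pvLoop_eq_chain]
  exact pvChain_neg k _ (pvOnes_nonneg nums)
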